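-- pv_equiv track=rewrite | github.com/RodkinIvan/lm-studio-tts | tts_chat/utils.py | extract_speakable_segments
-- ===== SOURCE A (Python) =====
-- from typing import List, Tuple
--
-- def extract_speakable_segments(text: str, start_index: int) -> List[Tuple[str, int]]:
--     segments: List[Tuple[str, int]] = []
--     idx = start_index
--     length = len(text)
--
--     while idx < length:
--         char = text[idx]
--         if char in '.!?':
--             end = idx + 1
--             while end < length and (text[end].isspace() or text[end] in '.:;!?)*"'):
--                 end += 1
--             segment = text[start_index:end].strip()
--             if segment:
--                 segments.append((segment, end))
--             start_index = end
--             idx = end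
--             continue
--
--         if char == '\n':
--             segment = text[start_index:idx].strip()
--             if segment:
--                 segments.append((segment, idx + 1))
--             start_index = idx + 1
--             idx = start_index
--             continue
--
--         idx += 1
--
--     return segments
-- ===== SOURCE B (Python) =====
-- from typing import List, Tuple
--
-- def extract_speakable_segments(text: str, start_index: int) -> List[Tuple[str, int]]:
--     # Staged pipeline: (1) locate every boundary cut as a (slice_stop, end) pair
--     # using a find-next-boundary helper, (2) build the segments by zipping each
--     # cut with the previous cut's end and filtering empty strips in a comprehension.
--     n = len(text)
--
--     def next_boundary(j: int):
--         # index of the next sentence terminator or newline at or after j, else None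
--         while j < n:
--             if text[j] in '.!?\n':
--                 return j
--             j += 1
--         return None
--
--     def absorb_end(e: int) -> int:
--         # end of the maximal run of whitespace/closing punctuation starting at e
--         while e < n and (text[e].isspace() or text[e] in '.:;!?)*"'):
--             e += 1
--         return e
--
--     def boundaries(pos: int) -> List[Tuple[int, int]]:
--         cuts: List[Tuple[int, int]] = []
--         b = next_boundary(pos)
--         while b is not None:
--             if text[b] == '\n':
--                 cuts.append((b, b + 1))
--                 pos = b + 1
--             else:
--                 e = absorb_end(b + 1)
--                 cuts.append((e, e))
--                 pos = e
--             b = next_boundary(pos)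
--         return cuts
--
--     cuts = boundaries(start_index)
--     starts = [start_index] + [end for _, end in cuts]
--     return [(seg, end)
--             for lo, (stop, end) in zip(starts, cuts)
--             for seg in [text[lo:stop].strip()]
--             if seg]
-- ===== Notes on version B (the rewrite author's own statement) =====
-- stated objective: alternative
-- what changed: A's single imperative while-loop that classifies each char and appends segments in place is replaced by a staged pipeline: a separate find-next-boundary helper builds the full list of (slice_stop, end) cuts first, and the segments are then produced by a comprehension zipping each cut with the previous cut's end.
import Mathlib
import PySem

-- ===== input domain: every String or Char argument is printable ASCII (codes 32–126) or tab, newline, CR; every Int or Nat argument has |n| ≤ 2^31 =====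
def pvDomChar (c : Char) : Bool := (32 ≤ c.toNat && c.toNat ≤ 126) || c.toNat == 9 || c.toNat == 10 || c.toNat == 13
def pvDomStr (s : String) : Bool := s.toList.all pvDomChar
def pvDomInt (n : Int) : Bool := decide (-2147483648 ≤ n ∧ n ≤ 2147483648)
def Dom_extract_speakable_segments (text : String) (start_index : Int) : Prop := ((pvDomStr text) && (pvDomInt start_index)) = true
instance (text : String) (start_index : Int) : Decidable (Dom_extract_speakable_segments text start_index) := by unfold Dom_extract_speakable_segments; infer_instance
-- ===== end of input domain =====

-- B restructures A's single imperative scan into a staged pipeline: a boundary-cut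
-- list is computed first, then segments come from zipping cuts with the previous
-- cut's end in a comprehension (objective: alternative decomposition, same cost).

-- ===== PORT A =====
-- `char in '.!?'` on a single char (exact: a 1-char needle is char membership)
def pvIsTerm (c : Char) : Bool := c == '.' || c == '!' || c == '?'
-- `text[end].isspace() or text[end] in '.:;!?)*"'`
def pvIsAbsorb (c : Char) : Bool :=
  PySem.Chars.isspace c || c == '.' || c == ':' || c == ';' || c == '!' || c == '?' || c == ')' || c == '*' || c == '"'

-- A's inner `while end < length and (...)` loop
def pvAbsorbEnd (text : String) (e : Int) : Int :=
  if _h : e < PySem.Str.len text then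
    match PySem.Str.pyGet? text e with
    | some c => if pvIsAbsorb c then pvAbsorbEnd text (e + 1) else e
    | none => e   -- Python raises IndexError here; unreachable under Pre_
  else e
termination_by (PySem.Str.len text - e).toNat
decreasing_by omega

theorem pvAbsorbEnd_ge (text : String) (e : Int) : e ≤ pvAbsorbEnd text e := by
  unfold pvAbsorbEnd
  split
  · split
    · split
      · have := pvAbsorbEnd_ge text (e + 1); omega
      · omega
    · omega
  · omega
termination_by (PySem.Str.len text - e).toNat
decreasing_by omega

-- A's outer `while idx < length` loop, state (segments, start_index, idx)
def pvLoopA (text : String) (segments : List (String × Int)) (start idx : Int) : List (String × Int) :=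
  if _h : idx < PySem.Str.len text then
    match PySem.Str.pyGet? text idx with
    | none => segments   -- Python raises IndexError here; excluded by Pre_
    | some c =>
      if pvIsTerm c then
        let e := pvAbsorbEnd text (idx + 1)
        let seg := PySem.Str.strip (PySem.Str.slice text (some start) (some e))
        pvLoopA text (if seg = "" then segments else segments ++ [(seg, e)]) e e
      else if c = '\n' then
        let seg := PySem.Str.strip (PySem.Str.slice text (some start) (some idx))
        pvLoopA text (if seg = "" then segments else segments ++ [(seg, idx + 1)]) (idx + 1) (idx + 1)
      else pvLoopA text segments start (idx + 1)
  else segments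
termination_by (PySem.Str.len text - idx).toNat
decreasing_by
  · have := pvAbsorbEnd_ge text (idx + 1); omega
  · omega
  · omega

def extract_speakable_segments (text : String) (start_index : Int) : List (String × Int) :=
  pvLoopA text [] start_index start_index

-- ===== PORT B =====
-- `text[j] in '.!?\n'`
def pvIsBoundary (c : Char) : Bool := c == '.' || c == '!' || c == '?' || c == '\n'

-- B's helper `next_boundary(j)`
def pvNextBoundary (text : String) (j : Int) : Option Int :=
  if _h : j < PySem.Str.len text then
    match PySem.Str.pyGet? text j with
    | some c => if pvIsBoundary c then some j else pvNextBoundary text (j + 1)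
    | none => none   -- Python raises IndexError here; excluded by Pre_
  else none
termination_by (PySem.Str.len text - j).toNat
decreasing_by omega

-- B's helper `absorb_end(e)` (same inner scan A performs after a terminator)
def pvAbsorbB (text : String) (e : Int) : Int :=
  if _h : e < PySem.Str.len text then
    match PySem.Str.pyGet? text e with
    | some c => if pvIsAbsorb c then pvAbsorbB text (e + 1) else e
    | none => e   -- Python raises IndexError here; excluded by Pre_
  else e
termination_by (PySem.Str.len text - e).toNat
decreasing_by omega

theorem pvAbsorbB_ge (text : String) (e : Int) : e ≤ pvAbsorbB text e := by
  unfold pvAbsorbB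
  split
  · split
    · split
      · have := pvAbsorbB_ge text (e + 1); omega
      · omega
    · omega
  · omega
termination_by (PySem.Str.len text - e).toNat
decreasing_by omega

-- B's `boundaries(pos)` loop; the `if _hb : …` guard only feeds the termination
-- measure (it is provably true whenever next_boundary returns some b)
def pvBoundaries (text : String) (pos : Int) : List (Int × Int) :=
  match _h : pvNextBoundary text pos with
  | none => []
  | some b =>
    if _hb : pos ≤ b ∧ b < PySem.Str.len text then
      match PySem.Str.pyGet? text b with
      | none => []   -- unreachable: next_boundary only returns readable indices
      | some c =>
        if c = '\n' then (b, b + 1) :: pvBoundaries text (b + 1)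
        else
          let e := pvAbsorbB text (b + 1)
          (e, e) :: pvBoundaries text e
    else []
termination_by (PySem.Str.len text - pos).toNat
decreasing_by
  · omega
  · have := pvAbsorbB_ge text (b + 1); omega

def extract_speakable_segments_alt (text : String) (start_index : Int) : List (String × Int) :=
  let cuts := pvBoundaries text start_index
  let starts := start_index :: cuts.map Prod.snd
  (starts.zip cuts).flatMap (fun p =>
    let seg := PySem.Str.strip (PySem.Str.slice text (some p.1) (some p.2.1))
    if seg = "" then [] else [(seg, p.2.2)])

-- ===== PRECONDITION & SPEC =====
-- Pre_ excludes exactly the inputs where A raises IndexError (start_index below -len(text)).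
def Pre_extract_speakable_segments (text : String) (start_index : Int) : Prop :=
  -(PySem.Str.len text) ≤ start_index
instance (text : String) (start_index : Int) : Decidable (Pre_extract_speakable_segments text start_index) := by unfold Pre_extract_speakable_segments; infer_instance

def pvWitness_extract_speakable_segments : String × Int := ("Hi there. Bye!\nEnd", 0)

def Spec_extract_speakable_segments (text : String) (start_index : Int) (out : List (String × Int)) : Prop := out = extract_speakable_segments_alt text start_index
instance (text : String) (start_index : Int) (out : List (String × Int)) : Decidable (Spec_extract_speakable_segments text start_index out) := by unfold Spec_extract_speakable_segments; infer_instance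

-- ===== CLAIM (what is proved, stated in full; the proofs are below) =====
def Claim_equal_extract_speakable_segments : Prop := ∀ (text : String) (start_index : Int), Dom_extract_speakable_segments text start_index → Pre_extract_speakable_segments text start_index → Spec_extract_speakable_segments text start_index (extract_speakable_segments text start_index)

-- ===== LEMMAS AND PROOFS =====

-- next_boundary only returns readable indices at or after its argument
theorem pvNextBoundary_lt (text : String) (j b : Int)
    (h : pvNextBoundary text j = some b) : j ≤ b ∧ b < PySem.Str.len text := by
  unfold pvNextBoundary at h
  split at h
  · split at h
    · split at h
      · cases h; omega
      · have := pvNextBoundary_lt text (j + 1) b h; omega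
    · cases h
  · cases h
termination_by (PySem.Str.len text - j).toNat
decreasing_by omega


theorem pvGetList_isSome (s : List Char) (i : Int) (h1 : -(s.length : Int) ≤ i)
    (h2 : i < (s.length : Int)) : (PySem.List.pyGet? s i).isSome := by
  simp only [PySem.List.pyGet?, PySem.List.pyIdx?]
  split_ifs with h
  · simp; omega
  · simp; omega

theorem pvGet_isSome (text : String) (i : Int) (h1 : -(PySem.Str.len text) ≤ i)
    (h2 : i < PySem.Str.len text) : ∃ c, PySem.Str.pyGet? text i = some c := by
  rw [PySem.Str.len_eq] at h1 h2
  have := pvGetList_isSome text.toList i h1 h2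
  simp only [PySem.Str.pyGet?_eq, PySem.Chars.pyGet?_eq_listPyGet?]
  exact Option.isSome_iff_exists.mp this

-- the two absorb scanners are the same function
theorem pvAbsorbB_eq (text : String) (e : Int) : pvAbsorbB text e = pvAbsorbEnd text e := by
  unfold pvAbsorbB pvAbsorbEnd
  split
  · split
    · split
      · exact pvAbsorbB_eq text (e + 1)
      · rfl
    · rfl
  · rfl
termination_by (PySem.Str.len text - e).toNat
decreasing_by omega

-- unfold equations for pvNextBoundary
theorem pvNextBoundary_stop (text : String) (j : Int) (h : ¬ j < PySem.Str.len text) :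
    pvNextBoundary text j = none := by
  rw [pvNextBoundary, dif_neg h]

theorem pvNextBoundary_hit (text : String) (j : Int) (c : Char)
    (hlt : j < PySem.Str.len text) (hc : PySem.Str.pyGet? text j = some c)
    (hb : pvIsBoundary c = true) : pvNextBoundary text j = some j := by
  rw [pvNextBoundary, dif_pos hlt, hc]
  simp [hb]

theorem pvNextBoundary_skip (text : String) (j : Int) (c : Char)
    (hlt : j < PySem.Str.len text) (hc : PySem.Str.pyGet? text j = some c)
    (hb : pvIsBoundary c = false) : pvNextBoundary text j = pvNextBoundary text (j + 1) := by
  rw [pvNextBoundary, dif_pos hlt, hc]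
  simp [hb]

-- unfold equations for pvBoundaries
theorem pvBoundaries_none (text : String) (pos : Int)
    (h : pvNextBoundary text pos = none) : pvBoundaries text pos = [] := by
  rw [pvBoundaries]
  split
  · rfl
  · rename_i b hb; rw [h] at hb; cases hb

theorem pvBoundaries_some (text : String) (pos b : Int) (c : Char)
    (h : pvNextBoundary text pos = some b) (hc : PySem.Str.pyGet? text b = some c) :
    pvBoundaries text pos =
      (if c = '\n' then (b, b + 1) :: pvBoundaries text (b + 1)
       else (pvAbsorbB text (b + 1), pvAbsorbB text (b + 1)) ::
            pvBoundaries text (pvAbsorbB text (b + 1))) := by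
  have hlt := pvNextBoundary_lt text pos b h
  rw [pvBoundaries]
  split
  · rename_i hb; rw [h] at hb; cases hb
  · rename_i b' hb; rw [h] at hb; cases hb
    rw [dif_pos hlt, hc]

-- if an ordinary char is skipped, the boundary list is unchanged
theorem pvBoundaries_skip (text : String) (idx : Int) (c : Char)
    (h1 : -(PySem.Str.len text) ≤ idx)
    (hlt : idx < PySem.Str.len text) (hc : PySem.Str.pyGet? text idx = some c)
    (hb : pvIsBoundary c = false) : pvBoundaries text idx = pvBoundaries text (idx + 1) := by
  have hnb := pvNextBoundary_skip text idx c hlt hc hb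
  rcases h2 : pvNextBoundary text (idx + 1) with _ | b
  · rw [pvBoundaries_none text idx (hnb.trans h2), pvBoundaries_none text (idx + 1) h2]
  · have hlt2 := pvNextBoundary_lt text (idx + 1) b h2
    obtain ⟨c', hc'⟩ := pvGet_isSome text b (by omega) hlt2.2
    rw [pvBoundaries_some text idx b c' (hnb.trans h2) hc',
        pvBoundaries_some text (idx + 1) b c' h2 hc']

-- recursive form of B's final comprehension: emit each cut's slice from the
-- previous cut's end
def pvEmit (text : String) : Int → List (Int × Int) → List (String × Int)
  | _, [] => []
  | lo, (stop, e) :: rest =>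
    (let seg := PySem.Str.strip (PySem.Str.slice text (some lo) (some stop))
     if seg = "" then [] else [(seg, e)]) ++ pvEmit text e rest

theorem pvEmit_eq_flatMap (text : String) (cuts : List (Int × Int)) (lo : Int) :
    ((lo :: cuts.map Prod.snd).zip cuts).flatMap (fun p =>
      let seg := PySem.Str.strip (PySem.Str.slice text (some p.1) (some p.2.1))
      if seg = "" then [] else [(seg, p.2.2)]) = pvEmit text lo cuts := by
  induction cuts generalizing lo with
  | nil => rfl
  | cons c rest ih =>
    obtain ⟨stop, e⟩ := c
    simp only [List.map_cons, List.zip_cons_cons, List.flatMap_cons, pvEmit]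
    rw [ih e]

-- a boundary char is a terminator or a newline
theorem pvBoundary_iff (c : Char) : pvIsBoundary c = (pvIsTerm c || c == '\n') := by
  simp [pvIsBoundary, pvIsTerm, Bool.or_assoc]

-- MAIN LEMMA: A's outer loop equals "emit the boundary cuts from the cursor"
theorem pvMain (text : String) (idx : Int) (segs : List (String × Int)) (cursor : Int)
    (h1 : -(PySem.Str.len text) ≤ idx) :
    pvLoopA text segs cursor idx = segs ++ pvEmit text cursor (pvBoundaries text idx) := by
  by_cases hlt : idx < PySem.Str.len text
  · obtain ⟨c, hc⟩ := pvGet_isSome text idx h1 hlt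
    cases hbdy : pvIsBoundary c
    · -- ordinary char: A skips it, B's boundary list is unchanged
      have hterm : pvIsTerm c = false := by
        have := pvBoundary_iff c; rw [hbdy] at this
        exact (Bool.or_eq_false_iff.mp this.symm).1
      have hnl : ¬ c = '\n' := by
        have := pvBoundary_iff c; rw [hbdy] at this
        simpa using (Bool.or_eq_false_iff.mp this.symm).2
      rw [pvLoopA, dif_pos hlt, hc]
      simp only [hterm, if_neg hnl, Bool.false_eq_true, if_false]
      rw [pvMain text (idx + 1) segs cursor (by omega),
          pvBoundaries_skip text idx c h1 hlt hc hbdy]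
    · have hnb := pvNextBoundary_hit text idx c hlt hc hbdy
      cases hterm : pvIsTerm c
      · -- newline cut
        have hnl : c = '\n' := by
          have := pvBoundary_iff c; rw [hbdy, hterm] at this
          simpa using this.symm
        rw [pvBoundaries_some text idx idx c hnb hc, if_pos hnl]
        rw [pvLoopA, dif_pos hlt, hc]
        simp only [hterm, Bool.false_eq_true, if_false, if_pos hnl]
        rw [pvMain text (idx + 1) _ (idx + 1) (by omega)]
        simp only [pvEmit]
        split <;> simp
      · -- terminator cut: the absorb scan gives the cut's stop = end = next cursor
        have hnl : ¬ c = '\n' := by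
          intro h; subst h; simp [pvIsTerm] at hterm
        rw [pvBoundaries_some text idx idx c hnb hc, if_neg hnl, pvAbsorbB_eq]
        rw [pvLoopA, dif_pos hlt, hc]
        simp only [hterm, if_true]
        have hge := pvAbsorbEnd_ge text (idx + 1)
        rw [pvMain text (pvAbsorbEnd text (idx + 1)) _ _ (by omega)]
        simp only [pvEmit]
        split <;> simp
  · rw [pvLoopA, dif_neg hlt, pvBoundaries_none text idx (pvNextBoundary_stop text idx hlt)]
    simp [pvEmit]
termination_by (PySem.Str.len text - idx).toNat
decreasing_by
  · omega
  · omega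
  · have := pvAbsorbEnd_ge text (idx + 1); omega

-- ===== VERDICT (by name: the statement is the Claim_ definition above) =====
theorem extract_speakable_segments_spec : Claim_equal_extract_speakable_segments := by
  intro text start_index _hdom hpre
  unfold Spec_extract_speakable_segments extract_speakable_segments extract_speakable_segments_alt
  rw [pvEmit_eq_flatMap, pvMain text start_index [] start_index hpre]
  simp
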